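-- pv_equiv track=rewrite | github.com/ekcaroline/all-python | pythonprojects/project3-creditcard.py | is_valid_RN
-- ===== SOURCE A (Python) =====
-- def is_valid_RN(routenum):
--     if not routenum.isdecimal():
--         return False
--     if len(routenum) != 9:
--         return False
--
--     totalone = 0
--     for digit in routenum[::-3]:
--         totalone += int(digit)
--
--     totaltwo = 0
--     for digit in routenum[-2::-3]:
--         totaltwo += int(digit)
--     totaltwo *=  7
--
--     totalthree = 0
--     for digit in routenum[-3::-3]:
--         totalthree += int(digit)
--     totalthree *= 3
--
--     return (totalone + totaltwo + totalthree) % 10 == 0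
-- ===== SOURCE B (Python) =====
-- def is_valid_RN(routenum):
--     if not routenum.isdecimal():
--         return False
--     if len(routenum) != 9:
--         return False
--     total = sum(int(d) * w for d, w in zip(routenum, (3, 7, 1, 3, 7, 1, 3, 7, 1)))
--     return total % 10 == 0
-- ===== Notes on version B (the rewrite author's own statement) =====
-- stated objective: simpler
-- what changed: Replaces A's three separate reverse-strided slice passes (weights applied per pass afterwards) by one left-to-right pass over zip(routenum, weight-table (3,7,1)*3).
import Mathlib
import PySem

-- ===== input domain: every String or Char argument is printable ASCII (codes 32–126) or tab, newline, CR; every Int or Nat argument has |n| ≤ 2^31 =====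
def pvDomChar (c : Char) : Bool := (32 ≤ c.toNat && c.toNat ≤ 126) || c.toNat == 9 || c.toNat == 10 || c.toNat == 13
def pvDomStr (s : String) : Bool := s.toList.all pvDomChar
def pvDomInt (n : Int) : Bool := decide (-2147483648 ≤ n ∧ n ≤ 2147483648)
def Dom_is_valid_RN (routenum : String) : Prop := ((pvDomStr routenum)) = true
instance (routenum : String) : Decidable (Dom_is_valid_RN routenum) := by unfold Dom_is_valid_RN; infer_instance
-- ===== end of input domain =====

-- B collapses A's three reverse-strided slice passes into one left-to-right pass over a
-- position-indexed weight table (3,7,1)*3; objective: simpler.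
-- 'isdecimal' is ported as PySem.Str.strIsdigit: on the printable-ASCII domain Dom_is_valid_RN
-- the two Python predicates coincide (they differ only on non-ASCII digits).


-- int(d) for a single ASCII digit character d (both Pythons call int on guaranteed-digit chars)
def pvDigitVal (c : Char) : Int := (c.toNat : Int) - 48

-- ===== PORT A =====
def is_valid_RN (routenum : String) : Bool :=
  if !(PySem.Str.strIsdigit routenum) then false
  else if PySem.Str.len routenum ≠ 9 then false
  else
    let cs := routenum.toList
    -- routenum[::-3] / routenum[-2::-3] / routenum[-3::-3]; step ≠ 0 so slice? is some
    let totalone := ((PySem.List.slice? cs none none (-3)).getD []).foldl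
      (fun acc d => acc + pvDigitVal d) 0
    let totaltwo := (((PySem.List.slice? cs (some (-2)) none (-3)).getD []).foldl
      (fun acc d => acc + pvDigitVal d) 0) * 7
    let totalthree := (((PySem.List.slice? cs (some (-3)) none (-3)).getD []).foldl
      (fun acc d => acc + pvDigitVal d) 0) * 3
    PySem.Int.mod (totalone + totaltwo + totalthree) 10 == 0

-- ===== PORT B =====
def is_valid_RN_alt (routenum : String) : Bool :=
  if !(PySem.Str.strIsdigit routenum) then false
  else if PySem.Str.len routenum ≠ 9 then false
  else
    let total := ((routenum.toList.zip [3, 7, 1, 3, 7, 1, 3, 7, 1]).map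
      (fun p : Char × Int => pvDigitVal p.1 * p.2)).sum
    PySem.Int.mod total 10 == 0

-- ===== PRECONDITION & SPEC =====
def Spec_is_valid_RN (routenum : String) (out : Bool) : Prop := out = is_valid_RN_alt routenum
instance (routenum : String) (out : Bool) : Decidable (Spec_is_valid_RN routenum out) := by unfold Spec_is_valid_RN; infer_instance

-- ===== CLAIM (what is proved, stated in full; the proofs are below) =====
def Claim_equal_is_valid_RN : Prop := ∀ (routenum : String), Dom_is_valid_RN routenum → Spec_is_valid_RN routenum (is_valid_RN routenum)

-- ===== LEMMAS AND PROOFS =====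

-- routenum[::-3], routenum[-2::-3], routenum[-3::-3] on a nine-character list, made explicit
lemma slice_m3 (a b c d e f g h' i : Char) :
    (PySem.List.slice? [a, b, c, d, e, f, g, h', i] none none (-3)).getD [] = [i, f, c] := by
  norm_num [PySem.List.slice?, PySem.List.sliceIndices]; rfl

lemma slice_m2m3 (a b c d e f g h' i : Char) :
    (PySem.List.slice? [a, b, c, d, e, f, g, h', i] (some (-2)) none (-3)).getD [] = [h', e, b] := by
  norm_num [PySem.List.slice?, PySem.List.sliceIndices]; rfl

lemma slice_m3m3 (a b c d e f g h' i : Char) :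
    (PySem.List.slice? [a, b, c, d, e, f, g, h', i] (some (-3)) none (-3)).getD [] = [g, d, a] := by
  norm_num [PySem.List.slice?, PySem.List.sliceIndices]; rfl

lemma length_nine_eq (l : List Char) (h : l.length = 9) :
    ∃ a b c d e f g h' i, l = [a, b, c, d, e, f, g, h', i] := by
  match l, h with
  | [a, b, c, d, e, f, g, h', i], _ => exact ⟨a, b, c, d, e, f, g, h', i, rfl⟩

-- ===== VERDICT (by name: the statement is the Claim_ definition above) =====
theorem is_valid_RN_spec : Claim_equal_is_valid_RN := by
  intro s _
  unfold Spec_is_valid_RN is_valid_RN is_valid_RN_alt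
  by_cases hd : PySem.Chars.strIsdigit s.toList = true
  · by_cases hl : s.length = 9
    · rw [if_neg (by simp [hd]), if_neg (by simp [hl]),
          if_neg (by simp [hd]), if_neg (by simp [hl])]
      have hlen : s.toList.length = 9 := by simp [hl]
      obtain ⟨a, b, c, d, e, f, g, h', i, hs⟩ := length_nine_eq s.toList hlen
      simp only [hs, slice_m3, slice_m2m3, slice_m3m3, List.foldl, List.zip, List.zipWith,
        List.map, List.sum_cons, List.sum_nil]
      congr 2
      ring
    · have hl' : ¬((s.length : Int) = 9) := by exact_mod_cast hl
      simp [hl']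
  · simp [hd]
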